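-- pv_equiv track=rewrite | github.com/qweqwe228/Modeus-Scheduler | modeus_alg.py | generate_selections
-- ===== SOURCE A (Python) =====
-- import itertools
--
-- def generate_selections(subject_dict, limit_comb=10**6):
--     subjects = list(subject_dict.keys())
--     teams = [list(subject_dict[subj]) for subj in subjects]
--     count = 0
--     for combination in itertools.product(*teams):
--         yield dict(zip(subjects, combination))
--         count += 1
--         if count >= limit_comb:
--             break
-- ===== SOURCE B (Python) =====
-- def generate_selections(subject_dict, limit_comb=10**6):
--     items = list(subject_dict.items())
--     n = len(items)
--     count = 0
--     acc = []
--
--     def rec(i):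
--         nonlocal count
--         if i == n:
--             yield dict(acc)
--             count += 1
--         else:
--             name, teams = items[i]
--             for t in teams:
--                 acc.append((name, t))
--                 yield from rec(i + 1)
--                 acc.pop()
--                 if count >= limit_comb:
--                     return
--
--     yield from rec(0)
-- ===== Notes on version B (the rewrite author's own statement) =====
-- stated objective: alternative
-- what changed: Replaces itertools.product plus a capped for-loop over ready-made combinations by a hand-written recursive generator over the subject index that extends a partial assignment and stops early via a shared counter.
import Mathlib
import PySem

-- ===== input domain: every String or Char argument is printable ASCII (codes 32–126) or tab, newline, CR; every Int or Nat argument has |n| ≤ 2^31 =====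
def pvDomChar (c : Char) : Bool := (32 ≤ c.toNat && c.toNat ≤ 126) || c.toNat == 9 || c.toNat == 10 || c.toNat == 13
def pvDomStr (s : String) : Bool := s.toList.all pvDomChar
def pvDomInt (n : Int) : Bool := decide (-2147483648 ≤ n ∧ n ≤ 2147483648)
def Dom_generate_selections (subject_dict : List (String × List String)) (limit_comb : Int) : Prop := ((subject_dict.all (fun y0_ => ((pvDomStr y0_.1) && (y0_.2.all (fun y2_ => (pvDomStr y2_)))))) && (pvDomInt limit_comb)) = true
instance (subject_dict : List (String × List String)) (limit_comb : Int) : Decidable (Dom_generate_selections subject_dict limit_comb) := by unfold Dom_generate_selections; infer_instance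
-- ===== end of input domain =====

-- B replaces the itertools.product + capped for-loop by a recursive generator over the
-- subject index with an early-cutoff counter (objective: alternative decomposition).
-- Both functions are generators; equivalence is about the list of yielded dicts.

-- ===== PORT A =====
-- itertools.product(*teams), exact: first factor varies slowest
def pyProduct : List (List String) → List (List String)
  | [] => [[]]
  | ts :: rest => ts.flatMap (fun t => (pyProduct rest).map (t :: ·))

-- the 'for combination in product: yield dict(zip(subjects, combination)); count += 1; if count >= limit: break'
-- loop; dict(zip(subjects, combination)) = subjects.zip combination since the dict's keys are distinct
def genLoop (limit : Int) (subjects : List String) : List (List String) → Int → List (List (String × String))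
  | [], _ => []
  | comb :: rest, count =>
    let entry := subjects.zip comb
    if limit ≤ count + 1 then [entry] else entry :: genLoop limit subjects rest (count + 1)

def generate_selections (subject_dict : List (String × List String)) (limit_comb : Int) : List (List (String × String)) :=
  let d := PySem.Dict.ofList subject_dict
  let subjects := d.keys
  let teams := subjects.map (fun s => d.getD s [])
  genLoop limit_comb subjects (pyProduct teams) 0

-- ===== PORT B =====
-- rec(i) / its inner for-loop with acc.append / acc.pop around the recursive call, carrying the
-- nonlocal count: ported purely by passing acc ++ [(name, t)] to the recursive call; the yielded
-- dict(acc) has distinct keys, so it is acc itself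
mutual
def recB (limit : Int) : List (String × List String) → List (String × String) → Int → List (List (String × String)) × Int
  | [], acc, count => ([acc], count + 1)
  | (name, teams) :: rest, acc, count => loopB limit name teams rest acc count
termination_by items _ _ => (items.length, 0)

def loopB (limit : Int) (name : String) : List String → List (String × List String) → List (String × String) → Int → List (List (String × String)) × Int
  | [], _, _, count => ([], count)
  | t :: ts, rest, acc, count =>
    let r := recB limit rest (acc ++ [(name, t)]) count
    if limit ≤ r.2 then r
    else
      let r2 := loopB limit name ts rest acc r.2
      (r.1 ++ r2.1, r2.2)
termination_by ts rest _ _ => (rest.length, ts.length + 1)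
end

def generate_selections_alt (subject_dict : List (String × List String)) (limit_comb : Int) : List (List (String × String)) :=
  let items := (PySem.Dict.ofList subject_dict).items
  (recB limit_comb items [] 0).1

-- ===== PRECONDITION & SPEC =====
def Spec_generate_selections (subject_dict : List (String × List String)) (limit_comb : Int) (out : List (List (String × String))) : Prop := out = generate_selections_alt subject_dict limit_comb
instance (subject_dict : List (String × List String)) (limit_comb : Int) (out : List (List (String × String))) : Decidable (Spec_generate_selections subject_dict limit_comb out) := by unfold Spec_generate_selections; infer_instance

-- ===== CLAIM (what is proved, stated in full; the proofs are below) =====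
def Claim_equal_generate_selections : Prop := ∀ (subject_dict : List (String × List String)) (limit_comb : Int), Dom_generate_selections subject_dict limit_comb → Spec_generate_selections subject_dict limit_comb (generate_selections subject_dict limit_comb)

-- ===== LEMMAS AND PROOFS =====

-- generic 'take with a counter, break once the count reaches the limit' (returns list and final count)
def tkc {α : Type} (limit : Int) : List α → Int → List α × Int
  | [], c => ([], c)
  | x :: rest, c =>
    if limit ≤ c + 1 then ([x], c + 1)
    else
      let r := tkc limit rest (c + 1)
      (x :: r.1, r.2)

theorem genLoop_eq_tkc (limit : Int) (subjects : List String) :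
    ∀ (combos : List (List String)) (count : Int),
      genLoop limit subjects combos count = (tkc limit (combos.map (subjects.zip ·)) count).1 := by
  intro combos
  induction combos with
  | nil => intro count; simp [genLoop, tkc]
  | cons c rest ih =>
    intro count
    simp only [genLoop, tkc, List.map_cons]
    split
    · rfl
    · simp [ih]

theorem tkc_cons {α : Type} (limit : Int) (x : α) (l : List α) (c : Int) :
    tkc limit (x :: l) c =
      if limit ≤ c + 1 then ([x], c + 1)
      else (x :: (tkc limit l (c + 1)).1, (tkc limit l (c + 1)).2) := by
  rw [tkc]

theorem tkc_append {α : Type} (limit : Int) :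
    ∀ (l1 l2 : List α) (c : Int),
      tkc limit (l1 ++ l2) c =
        if l1 ≠ [] ∧ limit ≤ (tkc limit l1 c).2 then tkc limit l1 c
        else ((tkc limit l1 c).1 ++ (tkc limit l2 (tkc limit l1 c).2).1,
              (tkc limit l2 (tkc limit l1 c).2).2) := by
  intro l1
  induction l1 with
  | nil => intro l2 c; simp [tkc]
  | cons x l1' ih =>
    intro l2 c
    rw [List.cons_append, tkc_cons limit x (l1' ++ l2) c, tkc_cons limit x l1' c]
    by_cases h1 : limit ≤ c + 1
    · simp [h1]
    · simp only [if_neg h1]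
      rw [ih]
      cases l1' with
      | nil => simp [tkc, h1]
      | cons y l1'' =>
        by_cases h2 : limit ≤ (tkc limit (y :: l1'') (c + 1)).2
        · simp [h2]
        · simp [h2]

theorem recB_eq_tkc (limit : Int) :
    ∀ (items : List (String × List String)) (acc : List (String × String)) (count : Int),
      recB limit items acc count =
        tkc limit ((pyProduct (items.map (·.2))).map
          (fun comb => acc ++ (items.map (·.1)).zip comb)) count := by
  intro items
  induction items with
  | nil =>
    intro acc count
    simp only [recB, List.map_nil, pyProduct, List.zip_nil_right, List.map_cons, List.map_nil,
      List.append_nil, tkc]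
    split <;> rfl
  | cons p rest ih =>
    obtain ⟨name, ts⟩ := p
    intro acc count
    have hlist : (pyProduct ((((name, ts) :: rest)).map (·.2))).map
        (fun comb => acc ++ ((((name, ts) :: rest)).map (·.1)).zip comb)
        = ts.flatMap (fun t => (pyProduct (rest.map (·.2))).map
            (fun comb => (acc ++ [(name, t)]) ++ (rest.map (·.1)).zip comb)) := by
      simp [pyProduct, List.map_flatMap, List.map_map, Function.comp_def, List.zip_cons_cons]
    rw [hlist]; clear hlist
    rw [recB]
    induction ts generalizing count with
    | nil => simp [loopB, tkc]
    | cons t ts' iht =>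
      simp only [List.flatMap_cons]
      rw [tkc_append]
      have hr := ih (acc ++ [(name, t)]) count
      by_cases hP : pyProduct (rest.map (·.2)) = []
      · -- every block is empty: both sides unwind to ([], count)
        have hz : ∀ (l : List String),
            l.flatMap (fun _ => ([] : List (List (String × String)))) = [] := by
          intro l; induction l <;> simp_all
        simp only [hP, List.map_nil] at hr iht ⊢
        rw [hz] at iht ⊢
        simp only [loopB, hr, tkc]
        split
        · simp
        · simpa [tkc] using iht count
      · have hne : (pyProduct (rest.map (·.2))).map
            (fun comb => (acc ++ [(name, t)]) ++ (rest.map (·.1)).zip comb) ≠ [] := by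
          simpa using hP
        simp only [loopB, hr, hne, ne_eq, not_false_eq_true, true_and]
        split
        · rfl
        · simp [iht]

theorem main_eq (limit : Int) (sd : List (String × List String)) :
    generate_selections sd limit = generate_selections_alt sd limit := by
  show genLoop limit (PySem.Dict.ofList sd).keys
      (pyProduct ((PySem.Dict.ofList sd).keys.map (fun s => (PySem.Dict.ofList sd).getD s []))) 0
    = (recB limit (PySem.Dict.ofList sd).items [] 0).1
  set d := PySem.Dict.ofList sd with hd
  have hnd : d.keys.Nodup := PySem.Dict.nodup_keys_ofList sd
  have hteams : d.keys.map (fun s => d.getD s []) = d.items.map (·.2) := by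
    have h := (PySem.Dict.values_eq_map_keys d hnd ([] : List String)).symm
    simpa [PySem.Dict.values] using h
  have hkeys : d.keys = d.items.map (·.1) := by simp [PySem.Dict.keys]
  rw [genLoop_eq_tkc, recB_eq_tkc, hteams, hkeys]
  simp

-- ===== VERDICT (by name: the statement is the Claim_ definition above) =====
theorem generate_selections_spec : Claim_equal_generate_selections := by
  intro sd limit _
  exact main_eq limit sd
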